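-- pv_equiv track=rewrite | github.com/mattporritt/agentic_indexer | src/moodle_indexer/components.py | component_root_from_name
-- ===== SOURCE A (Python) =====
-- CORE_COMPONENT_ROOTS = {
--     "core": "lib",
--     "core_admin": "admin",
--     "core_course": "course",
--     "core_user": "user",
--     "core_group": "group",
--     "core_calendar": "calendar",
--     "core_files": "files",
--     "core_tag": "tag",
--     "core_backup": "backup",
--     "core_badges": "badges",
--     "core_grade": "grade",
--     "core_message": "message",
--     "core_question": "question",
--     "core_availability": "availability",
--     "core_contentbank": "contentbank",
--     "core_payment": "payment",
--     "core_media": "media",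
--     "core_ai": "ai",
-- }
--
-- def component_root_from_name(component_name: str) -> str | None:
--     """Return the Moodle root path for a known frankenstyle component name."""
--
--     if component_name in CORE_COMPONENT_ROOTS:
--         return CORE_COMPONENT_ROOTS[component_name]
--
--     prefix_mappings = {
--         "tool_": "admin/tool",
--         "report_": "admin/report",
--         "aiprovider_": "ai/provider",
--         "format_": "course/format",
--         "qtype_": "question/type",
--         "qbehaviour_": "question/behaviour",
--         "qformat_": "question/format",
--         "availability_": "availability/condition",
--         "gradereport_": "grade/report",
--         "gradeexport_": "grade/export",
--         "gradeimport_": "grade/import",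
--         "media_": "media/player",
--         "paygw_": "payment/gateway",
--         "contenttype_": "contentbank/contenttype",
--         "message_": "message/output",
--         "blocks_": "blocks",
--         "mod_": "mod",
--         "local_": "local",
--         "theme_": "theme",
--         "auth_": "auth",
--         "enrol_": "enrol",
--         "repository_": "repository",
--         "filter_": "filter",
--         "editor_": "editor",
--         "portfolio_": "portfolio",
--         "plagiarism_": "plagiarism",
--     }
--     for prefix, root in prefix_mappings.items():
--         if component_name.startswith(prefix):
--             suffix = component_name.removeprefix(prefix)
--             return f"{root}/{suffix}"
--     return None
-- ===== SOURCE B (Python) =====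
-- CORE_SUBSYSTEMS = frozenset({
--     "admin", "course", "user", "group", "calendar", "files", "tag",
--     "backup", "badges", "grade", "message", "question", "availability",
--     "contentbank", "payment", "media", "ai",
-- })
--
-- PLUGIN_TYPE_ROOTS = {
--     "tool": "admin/tool",
--     "report": "admin/report",
--     "aiprovider": "ai/provider",
--     "format": "course/format",
--     "qtype": "question/type",
--     "qbehaviour": "question/behaviour",
--     "qformat": "question/format",
--     "availability": "availability/condition",
--     "gradereport": "grade/report",
--     "gradeexport": "grade/export",
--     "gradeimport": "grade/import",
--     "media": "media/player",
--     "paygw": "payment/gateway",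
--     "contenttype": "contentbank/contenttype",
--     "message": "message/output",
--     "blocks": "blocks",
--     "mod": "mod",
--     "local": "local",
--     "theme": "theme",
--     "auth": "auth",
--     "enrol": "enrol",
--     "repository": "repository",
--     "filter": "filter",
--     "editor": "editor",
--     "portfolio": "portfolio",
--     "plagiarism": "plagiarism",
-- }
--
-- def component_root_from_name(component_name: str) -> str | None:
--     """Return the Moodle root path for a known frankenstyle component name."""
--     if component_name == "core":
--         return "lib"
--     head, sep, tail = component_name.partition("_")
--     if not sep:
--         return None
--     if head == "core":
--         return tail if tail in CORE_SUBSYSTEMS else None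
--     root = PLUGIN_TYPE_ROOTS.get(head)
--     return None if root is None else f"{root}/{tail}"
-- ===== Notes on version B (the rewrite author's own statement) =====
-- stated objective: idiomatic
-- what changed: Replaces A's full-name dict plus ordered startswith scan over 26 underscore-terminated prefixes by one partition at the first underscore and token-based dispatch: a special case for the core component with a subsystem set, and a plugin-type dict keyed by the bare type token.
import Mathlib
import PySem

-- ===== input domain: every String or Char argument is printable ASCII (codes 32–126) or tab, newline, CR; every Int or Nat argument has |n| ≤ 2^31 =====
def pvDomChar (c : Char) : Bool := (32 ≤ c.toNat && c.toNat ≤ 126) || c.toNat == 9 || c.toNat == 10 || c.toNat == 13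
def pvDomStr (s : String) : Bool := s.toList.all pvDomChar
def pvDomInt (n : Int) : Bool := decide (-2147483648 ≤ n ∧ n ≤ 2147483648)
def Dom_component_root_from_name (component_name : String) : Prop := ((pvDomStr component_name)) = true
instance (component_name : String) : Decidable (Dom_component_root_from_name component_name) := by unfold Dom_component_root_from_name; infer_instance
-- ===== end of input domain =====

-- B replaces A's full-name dict plus ordered startswith scan over 26 underscore-terminated prefixes by one
-- partition at the first underscore and token dispatch: a core-subsystem set and a plugin-type dict; same return value everywhere.


-- ===== PORT A =====
-- CORE_COMPONENT_ROOTS (module constant of A)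
-- the dict literal has distinct keys, so Dict.mk of its pairs is exactly the Python dict
def pvCoreRoots : PySem.Dict String String := PySem.Dict.mk
  [("core", "lib"), ("core_admin", "admin"), ("core_course", "course"), ("core_user", "user"),
   ("core_group", "group"), ("core_calendar", "calendar"), ("core_files", "files"),
   ("core_tag", "tag"), ("core_backup", "backup"), ("core_badges", "badges"),
   ("core_grade", "grade"), ("core_message", "message"), ("core_question", "question"),
   ("core_availability", "availability"), ("core_contentbank", "contentbank"),
   ("core_payment", "payment"), ("core_media", "media"), ("core_ai", "ai")]

-- prefix_mappings, iterated in insertion order (dict → association list)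
def pvPrefixRootsA : List (String × String) :=
  [("tool_", "admin/tool"), ("report_", "admin/report"), ("aiprovider_", "ai/provider"),
   ("format_", "course/format"), ("qtype_", "question/type"), ("qbehaviour_", "question/behaviour"),
   ("qformat_", "question/format"), ("availability_", "availability/condition"),
   ("gradereport_", "grade/report"), ("gradeexport_", "grade/export"),
   ("gradeimport_", "grade/import"), ("media_", "media/player"), ("paygw_", "payment/gateway"),
   ("contenttype_", "contentbank/contenttype"), ("message_", "message/output"),
   ("blocks_", "blocks"), ("mod_", "mod"), ("local_", "local"), ("theme_", "theme"),
   ("auth_", "auth"), ("enrol_", "enrol"), ("repository_", "repository"), ("filter_", "filter"),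
   ("editor_", "editor"), ("portfolio_", "portfolio"), ("plagiarism_", "plagiarism")]

-- the 'for prefix, root in prefix_mappings.items(): if component_name.startswith(prefix): …' loop;
-- removeprefix is ported as dropping prefix-length chars, exact under the startswith guard
def pvLoopA (component_name : String) : List (String × String) → Option String
  | [] => none
  | (p, root) :: rest =>
      if PySem.Str.startswith component_name p then
        some (root ++ "/" ++ String.ofList (component_name.toList.drop p.toList.length))
      else pvLoopA component_name rest

def component_root_from_name (component_name : String) : Option String :=
  match pvCoreRoots.get? component_name with
  | some v => some v
  | none => pvLoopA component_name pvPrefixRootsA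

-- ===== PORT B =====
-- CORE_SUBSYSTEMS (frozenset): the known core subsystem names
def pvSubsList : List String :=
  ["admin", "course", "user", "group", "calendar", "files", "tag",
   "backup", "badges", "grade", "message", "question", "availability",
   "contentbank", "payment", "media", "ai"]

def pvCoreSubs : PySem.Set String := PySem.Set.ofList pvSubsList

-- PLUGIN_TYPE_ROOTS: bare plugin-type token → root
def pvTypeList : List (String × String) :=
  [("tool", "admin/tool"), ("report", "admin/report"), ("aiprovider", "ai/provider"),
   ("format", "course/format"), ("qtype", "question/type"), ("qbehaviour", "question/behaviour"),
   ("qformat", "question/format"), ("availability", "availability/condition"),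
   ("gradereport", "grade/report"), ("gradeexport", "grade/export"),
   ("gradeimport", "grade/import"), ("media", "media/player"), ("paygw", "payment/gateway"),
   ("contenttype", "contentbank/contenttype"), ("message", "message/output"),
   ("blocks", "blocks"), ("mod", "mod"), ("local", "local"), ("theme", "theme"),
   ("auth", "auth"), ("enrol", "enrol"), ("repository", "repository"), ("filter", "filter"),
   ("editor", "editor"), ("portfolio", "portfolio"), ("plagiarism", "plagiarism")]

-- the dict literal has distinct keys, so Dict.mk of its pairs is exactly the Python dict
def pvTypeRoots : PySem.Dict String String := PySem.Dict.mk pvTypeList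

-- component_name.partition("_") is ported by hand (PySem has no partition): for the single-char
-- separator '_' it is exactly head = chars before the first '_', tail = chars after it, and
-- 'not sep' is exactly 'no underscore' — the dropWhile being empty.
def component_root_from_name_alt (component_name : String) : Option String :=
  if component_name == "core" then some "lib"
  else
    match component_name.toList.dropWhile (· != '_') with
    | [] => none   -- if not sep: return None
    | _ :: tl =>
      if String.ofList (component_name.toList.takeWhile (· != '_')) == "core" then
        if PySem.Set.contains pvCoreSubs (String.ofList tl) then some (String.ofList tl) else none
      else
        match pvTypeRoots.get? (String.ofList (component_name.toList.takeWhile (· != '_'))) with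
        | some root => some (root ++ "/" ++ String.ofList tl)
        | none => none

-- ===== PRECONDITION & SPEC =====
def Spec_component_root_from_name (component_name : String) (out : Option String) : Prop := out = component_root_from_name_alt component_name
instance (component_name : String) (out : Option String) : Decidable (Spec_component_root_from_name component_name out) := by unfold Spec_component_root_from_name; infer_instance

-- ===== CLAIM (what is proved, stated in full; the proofs are below) =====
def Claim_equal_component_root_from_name : Prop := ∀ (component_name : String), Dom_component_root_from_name component_name → Spec_component_root_from_name component_name (component_root_from_name component_name)

-- ===== LEMMAS AND PROOFS =====

-- a '_'-free p followed by '_' is a prefix of t ++ '_' :: r (t '_'-free) iff p = t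
lemma pv_prefix_us {t p : List Char} (ht : '_' ∉ t) (hp : '_' ∉ p) (r : List Char) :
    (p ++ ['_']) <+: (t ++ '_' :: r) ↔ p = t := by
  induction p generalizing t with
  | nil =>
    cases t with
    | nil => simp
    | cons c t' =>
      rw [List.nil_append, List.cons_append, List.cons_prefix_cons]
      constructor
      · rintro ⟨h1, -⟩
        exact absurd (show '_' ∈ c :: t' by rw [← h1]; exact List.mem_cons_self) ht
      · intro h; exact absurd h (by simp)
  | cons c p' ih =>
    cases t with
    | nil =>
      rw [List.cons_append, List.nil_append, List.cons_prefix_cons]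
      constructor
      · rintro ⟨h1, -⟩
        exact absurd (show '_' ∈ c :: p' by rw [h1]; exact List.mem_cons_self) hp
      · intro h; exact absurd h (by simp)
    | cons d t' =>
      rw [List.cons_append, List.cons_append, List.cons_prefix_cons]
      have ih' := ih (t := t') (fun h => ht (List.mem_cons_of_mem _ h))
        (fun h => hp (List.mem_cons_of_mem _ h))
      constructor
      · rintro ⟨rfl, h2⟩; rw [ih'.mp h2]
      · rintro h; injection h with h1 h2; exact ⟨h1, ih'.mpr h2⟩

-- splitting a string at its first underscore is unique
lemma pv_split_eq_iff {t t' r r' : List Char} (ht : '_' ∉ t) (ht' : '_' ∉ t') :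
    t' ++ '_' :: r' = t ++ '_' :: r ↔ t' = t ∧ r' = r := by
  constructor
  · intro h
    have hpre : (t' ++ ['_']) <+: (t ++ '_' :: r) := ⟨r', by simpa using h⟩
    have h1 : t' = t := (pv_prefix_us ht ht' r).mp hpre
    subst h1
    have h2 := List.append_cancel_left h
    exact ⟨rfl, by injection h2⟩
  · rintro ⟨rfl, rfl⟩; rfl

-- A's loop finds nothing when the input has no underscore (every prefix contains one)
lemma pv_loopA_none (s : String) (h : '_' ∉ s.toList) :
    ∀ tb : List (String × String), (∀ kv ∈ tb, '_' ∈ kv.1.toList) → pvLoopA s tb = none := by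
  intro tb
  induction tb with
  | nil => intro _; rfl
  | cons kv rest ih =>
    intro hall
    obtain ⟨p, root⟩ := kv
    have hpre : ¬ PySem.Chars.startswith s.toList p.toList = true := by
      rw [PySem.Chars.startswith_iff]
      intro hpfx
      exact h (hpfx.subset (hall (p, root) List.mem_cons_self))
    simp only [pvLoopA, PySem.Str.startswith_eq]
    rw [if_neg hpre]
    exact ih (fun kv hkv => hall kv (List.mem_cons_of_mem _ hkv))

-- A's loop over "token_" prefixes equals a dict lookup of the first token
lemma pv_loopA_chain (t r : List Char) (ht : '_' ∉ t) (s : String)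
    (hs : s.toList = t ++ '_' :: r) :
    ∀ tbl : List (String × String), (∀ kv ∈ tbl, '_' ∉ kv.1.toList) →
      pvLoopA s (tbl.map (fun kv => (kv.1 ++ "_", kv.2)))
        = ((PySem.Dict.mk tbl).get? (String.ofList t)).map
            (fun root => root ++ "/" ++ String.ofList r) := by
  intro tbl
  induction tbl with
  | nil => intro _; rfl
  | cons kv rest ih =>
    intro hall
    obtain ⟨k, root⟩ := kv
    have hk : '_' ∉ k.toList := hall (k, root) List.mem_cons_self
    have hsw : PySem.Chars.startswith s.toList (k ++ "_").toList = true ↔ k.toList = t := by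
      rw [PySem.Chars.startswith_iff, hs, String.toList_append]
      exact pv_prefix_us ht hk r
    simp only [List.map_cons, pvLoopA, PySem.Str.startswith_eq, PySem.Dict.get?_mk_cons]
    by_cases hkt : k.toList = t
    · have hbeq : (k == String.ofList t) = true := by
        rw [beq_iff_eq]
        apply String.toList_inj.mp
        rw [String.toList_ofList, hkt]
      rw [if_pos (hsw.mpr hkt), if_pos hbeq]
      simp only [Option.map_some]
      congr 2
      rw [hs, String.toList_append, hkt, show ("_" : String).toList = ['_'] from rfl]
      simp
    · have hbeq : ¬ (k == String.ofList t) = true := by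
        rw [beq_iff_eq]
        intro h
        exact hkt (by rw [h, String.toList_ofList])
      rw [if_neg (fun h => hkt (hsw.mp h)), if_neg hbeq]
      exact ih (fun kv hkv => hall kv (List.mem_cons_of_mem _ hkv))

-- the "core_X" block of A's dict looked up at t ++ '_' :: r is a membership test of r
lemma pv_coreDict_get (t r : List Char) (ht : '_' ∉ t) (s : String)
    (hs : s.toList = t ++ '_' :: r) :
    ∀ subs : List String,
      (PySem.Dict.mk (subs.map (fun X => ("core_" ++ X, X)))).get? s
        = if t = "core".toList ∧ String.ofList r ∈ subs then some (String.ofList r) else none := by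
  intro subs
  induction subs with
  | nil => rw [if_neg (fun h => List.not_mem_nil h.2)]; rfl
  | cons X rest ih =>
    simp only [List.map_cons, PySem.Dict.get?_mk_cons]
    have hkey : (("core_" ++ X) == s) = true ↔ (t = "core".toList ∧ X.toList = r) := by
      rw [beq_iff_eq, ← String.toList_inj, String.toList_append, hs,
        show ("core_" : String).toList ++ X.toList = "core".toList ++ '_' :: X.toList from rfl,
        pv_split_eq_iff ht (by decide)]
      rw [eq_comm (a := "core".toList) (b := t)]
    by_cases hm : t = "core".toList ∧ X.toList = r
    · rw [if_pos (hkey.mpr hm)]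
      have hX : X = String.ofList r := String.toList_inj.mp (by rw [String.toList_ofList, hm.2])
      rw [if_pos ⟨hm.1, by rw [← hX]; exact List.mem_cons_self⟩, hX]
    · rw [if_neg (fun h => hm (hkey.mp h)), ih]
      apply if_congr _ rfl rfl
      constructor
      · rintro ⟨h1, h2⟩; exact ⟨h1, List.mem_cons_of_mem _ h2⟩
      · rintro ⟨h1, h2⟩
        rcases List.mem_cons.mp h2 with h3 | h3
        · exact absurd ⟨h1, by rw [← h3, String.toList_ofList]⟩ hm
        · exact ⟨h1, h3⟩

-- the "core_X" block finds nothing in an underscore-free input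
lemma pv_coreDict_none (s : String) (h : '_' ∉ s.toList) :
    ∀ subs : List String, (PySem.Dict.mk (subs.map (fun X => ("core_" ++ X, X)))).get? s = none := by
  intro subs
  induction subs with
  | nil => rfl
  | cons X rest ih =>
    simp only [List.map_cons, PySem.Dict.get?_mk_cons]
    rw [if_neg, ih]
    rw [beq_iff_eq]
    intro hk
    apply h
    rw [← hk, String.toList_append]
    exact List.mem_append_left _ (by decide)

-- A's constants as the literal shapes the lemmas above consume
lemma pv_coreRoots_mk :
    pvCoreRoots = PySem.Dict.mk (("core", "lib") :: pvSubsList.map (fun X => ("core_" ++ X, X))) := by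
  rw [show pvSubsList.map (fun X => ("core_" ++ X, X)) =
    [("core_admin", "admin"), ("core_course", "course"), ("core_user", "user"),
     ("core_group", "group"), ("core_calendar", "calendar"), ("core_files", "files"),
     ("core_tag", "tag"), ("core_backup", "backup"), ("core_badges", "badges"),
     ("core_grade", "grade"), ("core_message", "message"), ("core_question", "question"),
     ("core_availability", "availability"), ("core_contentbank", "contentbank"),
     ("core_payment", "payment"), ("core_media", "media"), ("core_ai", "ai")] from by decide]
  rfl

lemma pv_tables : pvPrefixRootsA = pvTypeList.map (fun kv => (kv.1 ++ "_", kv.2)) := by decide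

-- membership in B's subsystem set is membership in the underlying list
lemma pv_subs_contains (x : String) : pvCoreSubs.contains x = true ↔ x ∈ pvSubsList := by
  unfold pvCoreSubs
  rw [PySem.Set.contains_iff, PySem.Set.mem_ofList]

-- evaluating B once the first underscore has been located
lemma pv_alt_eval (s : String) (hbne : (s == "core") = false) (r : List Char)
    (hdrop : s.toList.dropWhile (· != '_') = '_' :: r) :
    component_root_from_name_alt s =
      if String.ofList (s.toList.takeWhile (· != '_')) = "core" then
        (if String.ofList r ∈ pvSubsList then some (String.ofList r) else none)
      else
        (pvTypeRoots.get? (String.ofList (s.toList.takeWhile (· != '_')))).map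
          (fun root => root ++ "/" ++ String.ofList r) := by
  unfold component_root_from_name_alt
  rw [hdrop]
  simp only [hbne, Bool.false_eq_true, if_false]
  by_cases hc : String.ofList (s.toList.takeWhile (· != '_')) = "core"
  · rw [if_pos (by rw [beq_iff_eq]; exact hc), if_pos hc]
    exact if_congr ⟨fun h => (pv_subs_contains _).mp h, fun h => (pv_subs_contains _).mpr h⟩ rfl rfl
  · rw [if_neg (by rw [beq_iff_eq]; exact hc), if_neg hc]
    cases pvTypeRoots.get? (String.ofList (s.toList.takeWhile (· != '_'))) with
    | some root => rfl
    | none => rfl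

-- evaluating B when there is no underscore at all
lemma pv_alt_eval_none (s : String) (hbne : (s == "core") = false)
    (hdrop : s.toList.dropWhile (· != '_') = []) :
    component_root_from_name_alt s = none := by
  unfold component_root_from_name_alt
  rw [hdrop]
  simp only [hbne, Bool.false_eq_true, if_false]

-- ===== VERDICT (by name: the statement is the Claim_ definition above) =====
theorem component_root_from_name_spec : Claim_equal_component_root_from_name := by
  intro s _
  show component_root_from_name s = component_root_from_name_alt s
  by_cases hcore : s = "core"
  · subst hcore; decide
  · have hbne : (s == "core") = false := by rw [beq_eq_false_iff_ne]; exact hcore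
    have hcne : (("core" : String) == s) = false := by
      rw [beq_eq_false_iff_ne]; exact fun h => hcore h.symm
    by_cases hu : '_' ∈ s.toList
    · -- there is an underscore: s.toList = t ++ '_' :: r, t the part before it
      obtain ⟨t, r, ht, hs, htake, hdrop⟩ :
          ∃ t r, '_' ∉ t ∧ s.toList = t ++ '_' :: r ∧
            s.toList.takeWhile (· != '_') = t ∧ s.toList.dropWhile (· != '_') = '_' :: r := by
        refine ⟨s.toList.takeWhile (· != '_'), (s.toList.dropWhile (· != '_')).tail, ?_, ?_, rfl, ?_⟩
        · intro hm
          have := List.mem_takeWhile_imp hm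
          simp at this
        · conv_lhs => rw [← List.takeWhile_append_dropWhile (p := (· != '_')) (l := s.toList)]
          congr 1
          have hd : s.toList.dropWhile (· != '_') ≠ [] := by
            rw [ne_eq, List.dropWhile_eq_nil_iff]
            intro hall
            have := hall '_' hu
            simp at this
          have hhead : (s.toList.dropWhile (· != '_')).head hd = '_' := by
            have := List.head_dropWhile_not (· != '_') hd
            simpa using this
          have h2 := List.cons_head_tail hd
          rw [hhead] at h2
          exact h2.symm
        · have hd : s.toList.dropWhile (· != '_') ≠ [] := by
            rw [ne_eq, List.dropWhile_eq_nil_iff]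
            intro hall
            have := hall '_' hu
            simp at this
          have hhead : (s.toList.dropWhile (· != '_')).head hd = '_' := by
            have := List.head_dropWhile_not (· != '_') hd
            simpa using this
          have h2 := List.cons_head_tail hd
          rw [hhead] at h2
          exact h2.symm
      rw [pv_alt_eval s hbne r hdrop, htake]
      unfold component_root_from_name
      rw [pv_coreRoots_mk, PySem.Dict.get?_mk_cons,
        if_neg (fun h => Bool.false_ne_true (hcne.symm.trans h)),
        pv_coreDict_get t r ht s hs pvSubsList]
      have hofl : String.ofList t = "core" ↔ t = "core".toList := by
        rw [← String.toList_inj, String.toList_ofList]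
      by_cases hT : t = "core".toList
      · rw [if_pos (hofl.mpr hT)]
        by_cases hmem : String.ofList r ∈ pvSubsList
        · rw [if_pos ⟨hT, hmem⟩, if_pos hmem]
        · rw [if_neg (fun h => hmem h.2), if_neg hmem]
          show pvLoopA s pvPrefixRootsA = none
          rw [pv_tables, pv_loopA_chain t r ht s hs pvTypeList (by decide), hT,
            show (PySem.Dict.mk pvTypeList).get? (String.ofList "core".toList) = none from by decide]
          rfl
      · rw [if_neg (fun h => hT h.1), if_neg (fun h => hT (hofl.mp h))]
        show pvLoopA s pvPrefixRootsA = _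
        rw [pv_tables, pv_loopA_chain t r ht s hs pvTypeList (by decide)]
        rfl
    · -- no underscore: every branch of both programs misses
      have hdropnil : s.toList.dropWhile (· != '_') = [] :=
        List.dropWhile_eq_nil_iff.mpr (fun x hx => by simp; exact fun h => hu (h ▸ hx))
      rw [pv_alt_eval_none s hbne hdropnil]
      unfold component_root_from_name
      rw [pv_coreRoots_mk, PySem.Dict.get?_mk_cons,
        if_neg (fun h => Bool.false_ne_true (hcne.symm.trans h)),
        pv_coreDict_none s hu pvSubsList]
      exact pv_loopA_none s hu pvPrefixRootsA (by decide)
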